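-- pv_equiv track=rewrite | github.com/Freedom-Club-Sec/Coldwire-python | logic/utils.py | check_str_high_entropy
-- ===== SOURCE A (Python) =====
-- def check_str_high_entropy(s: str) -> bool:
--     # strings under 8 characters long are insecure no matter the language.
--     if len(s) < 8:
--         return False
--
--     # if string is not all ascii, just assume it has enough entropy.
--     if not s.isascii():
--         return True
--
--     # Check if string is all lowercase or uppercase
--     if s.lower() == s or s.upper() == s:
--         return False
--
--     # if all digits
--     if s.isdigit():
--         return False
--
--     # if doesn't contain digits
--     if not any(c.isdigit() for c in s):
--         return False
--
--     # Check for special characters, spaces, etc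
--     if not any(not c.isalnum() for c in s):
--         return False
--
--     return True
-- ===== SOURCE B (Python) =====
-- def check_str_high_entropy(s: str) -> bool:
--     # strings under 8 characters long are insecure no matter the language.
--     if len(s) < 8:
--         return False
--     # if string is not all ascii, just assume it has enough entropy.
--     if not s.isascii():
--         return True
--     # single fused pass accumulating the four character-class flags
--     has_upper = has_lower = has_digit = has_special = False
--     for c in s:
--         if c.isupper():
--             has_upper = True
--         if c.islower():
--             has_lower = True
--         if c.isdigit():
--             has_digit = True
--         if not c.isalnum():
--             has_special = True
--     return has_upper and has_lower and has_digit and has_special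
-- ===== Notes on version B (the rewrite author's own statement) =====
-- stated objective: simpler
-- what changed: Replaces A's five separate whole-string scans (lower/upper comparisons, isdigit, two any() generators) by one fused pass accumulating four character-class flags, returning their conjunction.
import Mathlib
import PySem

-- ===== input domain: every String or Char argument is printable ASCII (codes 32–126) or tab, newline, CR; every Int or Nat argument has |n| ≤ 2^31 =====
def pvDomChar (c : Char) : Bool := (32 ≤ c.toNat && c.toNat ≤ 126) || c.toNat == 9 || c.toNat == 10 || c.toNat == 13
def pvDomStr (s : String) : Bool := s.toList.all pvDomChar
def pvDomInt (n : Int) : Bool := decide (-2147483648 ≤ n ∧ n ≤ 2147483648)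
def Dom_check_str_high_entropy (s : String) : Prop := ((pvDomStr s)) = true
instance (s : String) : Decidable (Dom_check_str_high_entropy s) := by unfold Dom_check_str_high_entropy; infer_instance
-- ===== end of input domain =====

-- B replaces A's five separate whole-string scans by ONE fused pass accumulating four
-- character-class flags (simpler decomposition; same O(n) cost).

-- ===== PORT A =====
def check_str_high_entropy (s : String) : Bool :=
  if PySem.Str.len s < 8 then false
  -- s.isascii() ported by hand (exact: True iff every code point is ≤ 0x7F)
  else if !(s.toList.all (fun c => c.toNat ≤ 127)) then true
  else if (PySem.Chars.lower s.toList == s.toList || PySem.Chars.upper s.toList == s.toList) then false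
  else if PySem.Str.strIsdigit s then false
  else if !(s.toList.any (fun c => PySem.Chars.isdigit c)) then false
  else if !(s.toList.any (fun c => !(PySem.Chars.isalnum c))) then false
  else true

-- ===== PORT B =====
def check_str_high_entropy_alt (s : String) : Bool :=
  if PySem.Str.len s < 8 then false
  -- s.isascii() ported by hand (exact: True iff every code point is ≤ 0x7F)
  else if !(s.toList.all (fun c => c.toNat ≤ 127)) then true
  else
    let fl := s.toList.foldl
      (fun (fl : Bool × Bool × Bool × Bool) c =>
        ((if PySem.Chars.isupper c then true else fl.1),
         (if PySem.Chars.islower c then true else fl.2.1),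
         (if PySem.Chars.isdigit c then true else fl.2.2.1),
         (if !(PySem.Chars.isalnum c) then true else fl.2.2.2)))
      (false, false, false, false)
    fl.1 && fl.2.1 && fl.2.2.1 && fl.2.2.2

-- ===== PRECONDITION & SPEC =====
def Spec_check_str_high_entropy (s : String) (out : Bool) : Prop := out = check_str_high_entropy_alt s
instance (s : String) (out : Bool) : Decidable (Spec_check_str_high_entropy s out) := by unfold Spec_check_str_high_entropy; infer_instance

-- ===== CLAIM (what is proved, stated in full; the proofs are below) =====
def Claim_equal_check_str_high_entropy : Prop := ∀ (s : String), Dom_check_str_high_entropy s → Spec_check_str_high_entropy s (check_str_high_entropy s)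

-- ===== LEMMAS AND PROOFS =====

-- per-char facts
lemma lowerChar_eq_self_iff (c : Char) : PySem.Chars.lowerChar c = c ↔ PySem.Chars.isupper c = false := by
  unfold PySem.Chars.lowerChar
  cases h : PySem.Chars.isupper c
  · simp
  · unfold PySem.Chars.isupper at h
    simp only [Bool.and_eq_true, decide_eq_true_eq] at h
    have h1 : 65 ≤ c.toNat := Char.le_def.mp h.1
    have h2 : c.toNat ≤ 90 := Char.le_def.mp h.2
    simp only [Bool.true_eq_false, iff_false]
    intro he
    have hv : (Char.ofNat (c.toNat + 32)).toNat = c.toNat + 32 := by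
      rw [Char.toNat_ofNat, if_pos (Or.inl (by omega))]
    simp only [if_pos trivial] at he
    rw [he] at hv; omega

lemma upperChar_eq_self_iff (c : Char) : PySem.Chars.upperChar c = c ↔ PySem.Chars.islower c = false := by
  unfold PySem.Chars.upperChar
  cases h : PySem.Chars.islower c
  · simp
  · unfold PySem.Chars.islower at h
    simp only [Bool.and_eq_true, decide_eq_true_eq] at h
    have h1 : 97 ≤ c.toNat := Char.le_def.mp h.1
    have h2 : c.toNat ≤ 122 := Char.le_def.mp h.2
    simp only [Bool.true_eq_false, iff_false]
    intro he
    have hv : (Char.ofNat (c.toNat - 32)).toNat = c.toNat - 32 := by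
      rw [Char.toNat_ofNat, if_pos (Or.inl (by omega))]
    simp only [if_pos trivial] at he
    rw [he] at hv; omega

lemma isupper_not_isdigit {c : Char} (h : PySem.Chars.isupper c = true) : PySem.Chars.isdigit c = false := by
  unfold PySem.Chars.isupper at h
  unfold PySem.Chars.isdigit
  simp only [Bool.and_eq_true, decide_eq_true_eq] at h
  have h1 : 65 ≤ c.toNat := Char.le_def.mp h.1
  simp only [Bool.and_eq_false_iff, decide_eq_false_iff_not]
  right
  intro hle
  have h9 : c.toNat ≤ 57 := Char.le_def.mp hle
  omega

lemma map_eq_self_chars (f : Char → Char) (l : List Char) : l.map f = l ↔ ∀ x ∈ l, f x = x := by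
  induction l with
  | nil => simp
  | cons c t ih => simp [ih]

-- whole-string facts
lemma lower_eq_self_iff (l : List Char) : (PySem.Chars.lower l = l) ↔ (l.any PySem.Chars.isupper = false) := by
  unfold PySem.Chars.lower
  rw [map_eq_self_chars, List.any_eq_false]
  constructor
  · intro h c hc
    have := (lowerChar_eq_self_iff c).mp (h c hc)
    simp [this]
  · intro h c hc
    exact (lowerChar_eq_self_iff c).mpr (by simpa using h c hc)

lemma upper_eq_self_iff (l : List Char) : (PySem.Chars.upper l = l) ↔ (l.any PySem.Chars.islower = false) := by
  unfold PySem.Chars.upper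
  rw [map_eq_self_chars, List.any_eq_false]
  constructor
  · intro h c hc
    have := (upperChar_eq_self_iff c).mp (h c hc)
    simp [this]
  · intro h c hc
    exact (upperChar_eq_self_iff c).mpr (by simpa using h c hc)

lemma strIsdigit_false_of_upper {l : List Char} (h : l.any PySem.Chars.isupper = true) :
    PySem.Chars.strIsdigit l = false := by
  unfold PySem.Chars.strIsdigit
  rcases List.any_eq_true.mp h with ⟨c, hc, hu⟩
  have : l.all PySem.Chars.isdigit = false := by
    rw [List.all_eq_false]
    exact ⟨c, hc, by simp [isupper_not_isdigit hu]⟩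
  simp [this]

-- the fused fold computes the four 'any' flags
lemma fold_flags (l : List Char) (fl : Bool × Bool × Bool × Bool) :
    l.foldl
      (fun (fl : Bool × Bool × Bool × Bool) c =>
        ((if PySem.Chars.isupper c then true else fl.1),
         (if PySem.Chars.islower c then true else fl.2.1),
         (if PySem.Chars.isdigit c then true else fl.2.2.1),
         (if !(PySem.Chars.isalnum c) then true else fl.2.2.2))) fl
    = (fl.1 || l.any PySem.Chars.isupper,
       fl.2.1 || l.any PySem.Chars.islower,
       fl.2.2.1 || l.any PySem.Chars.isdigit,
       fl.2.2.2 || l.any (fun c => !(PySem.Chars.isalnum c))) := by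
  induction l generalizing fl with
  | nil => simp
  | cons c t ih =>
      simp only [List.foldl_cons, ih, List.any_cons]
      obtain ⟨a, b, d, e⟩ := fl
      simp only
      congr 1
      · cases h : PySem.Chars.isupper c <;> simp
      congr 1
      · cases h : PySem.Chars.islower c <;> simp
      congr 1
      · cases h : PySem.Chars.isdigit c <;> simp
      · cases h : PySem.Chars.isalnum c <;> simp

-- the tail of A's if-chain equals the conjunction of the four flags
lemma core (l : List Char) :
    (if (PySem.Chars.lower l == l || PySem.Chars.upper l == l) then false
     else if PySem.Chars.strIsdigit l then false
     else if !(l.any (fun c => PySem.Chars.isdigit c)) then false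
     else if !(l.any (fun c => !(PySem.Chars.isalnum c))) then false
     else true)
    = (l.any PySem.Chars.isupper && l.any PySem.Chars.islower && l.any PySem.Chars.isdigit && l.any (fun c => !(PySem.Chars.isalnum c))) := by
  cases hu : l.any PySem.Chars.isupper with
  | false =>
      have h1 : (PySem.Chars.lower l == l) = true := beq_iff_eq.mpr ((lower_eq_self_iff l).mpr hu)
      simp [h1]
  | true =>
      cases hl : l.any PySem.Chars.islower with
      | false =>
          have h2 : (PySem.Chars.upper l == l) = true := beq_iff_eq.mpr ((upper_eq_self_iff l).mpr hl)
          simp [h2]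
      | true =>
          have h1 : (PySem.Chars.lower l == l) = false := by
            rw [beq_eq_false_iff_ne]
            intro he
            rw [(lower_eq_self_iff l).mp he] at hu
            exact absurd hu (by simp)
          have h2 : (PySem.Chars.upper l == l) = false := by
            rw [beq_eq_false_iff_ne]
            intro he
            rw [(upper_eq_self_iff l).mp he] at hl
            exact absurd hl (by simp)
          simp only [h1, h2, Bool.or_self, Bool.false_eq_true, if_false,
            strIsdigit_false_of_upper hu, Bool.true_and]
          cases hd : l.any (fun c => PySem.Chars.isdigit c) with
          | false => simp
          | true =>
              cases hs : l.any (fun c => !(PySem.Chars.isalnum c)) with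
              | false => simp
              | true => simp

-- ===== VERDICT (by name: the statement is the Claim_ definition above) =====
theorem check_str_high_entropy_spec : Claim_equal_check_str_high_entropy := by
  intro s _
  unfold Spec_check_str_high_entropy check_str_high_entropy check_str_high_entropy_alt
  by_cases h8 : PySem.Str.len s < 8
  · rw [if_pos h8, if_pos h8]
  · rw [if_neg h8, if_neg h8]
    cases ha : s.toList.all (fun c => decide (c.toNat ≤ 127)) with
    | false => simp
    | true =>
        simp only [Bool.not_true, Bool.false_eq_true, if_false]
        rw [fold_flags]
        simp only [Bool.false_or]
        rw [show PySem.Str.strIsdigit s = PySem.Chars.strIsdigit s.toList from rfl]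
        exact core s.toList
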